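-- pv_equiv track=rewrite | github.com/junkeon/programmers | day022/prob063.py | solution
-- ===== SOURCE A (Python) =====
-- import heapq
--
-- def solution(stock, dates, supplies, k):
--     L = len(dates)
--
--     pq = []
--     idx = 0
--     answer = 0
--     while stock < k:
--         for i in range(idx, L):
--             if dates[i] > stock:
--                 break
--             heapq.heappush(pq, supplies[i] * -1)
--             idx += 1
--
--         stock += heapq.heappop(pq) * -1
--         answer += 1
--
--     return answer
-- ===== SOURCE B (Python) =====
-- def solution(stock, dates, supplies, k):
--     n = len(dates)
--     pool = []  # available supply amounts, kept sorted in descending order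
--     i = 0
--     answer = 0
--     while stock < k:
--         while i < n and dates[i] <= stock:
--             v = supplies[i]
--             p = 0
--             while p < len(pool) and pool[p] >= v:
--                 p += 1
--             pool.insert(p, v)
--             i += 1
--         stock += pool.pop(0)
--         answer += 1
--     return answer
-- ===== Notes on version B (the rewrite author's own statement) =====
-- stated objective: alternative
-- what changed: B keeps the available supplies in a plain list maintained in descending sorted order (linear-scan insertion, always pop the head) instead of A's heapq min-heap of negated supplies.
-- outside the precondition, e.g. on solution(0, [0, 0], [-1, 5], 1): A returns 1, B returns 1; on solution(0, [0, 5], [9], 9): A returns 1, B returns 1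
import Mathlib
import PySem

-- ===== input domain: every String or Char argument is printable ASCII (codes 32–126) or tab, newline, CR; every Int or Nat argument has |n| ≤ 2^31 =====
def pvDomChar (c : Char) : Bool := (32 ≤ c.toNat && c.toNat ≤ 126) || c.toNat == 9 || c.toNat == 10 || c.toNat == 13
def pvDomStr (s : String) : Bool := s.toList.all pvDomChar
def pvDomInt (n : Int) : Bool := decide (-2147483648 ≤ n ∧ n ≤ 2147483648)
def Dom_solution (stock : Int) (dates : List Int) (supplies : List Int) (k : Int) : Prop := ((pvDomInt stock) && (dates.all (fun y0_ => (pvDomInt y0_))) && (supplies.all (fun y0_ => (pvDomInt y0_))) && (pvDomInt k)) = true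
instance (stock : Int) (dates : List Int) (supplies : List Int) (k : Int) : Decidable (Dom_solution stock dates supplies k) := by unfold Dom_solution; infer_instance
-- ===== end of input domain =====

-- B replaces A's heapq min-heap of negated supplies by a plain list of the available supplies
-- kept sorted in descending order (linear-scan insertion, pop the head); return values proved equal.

-- ===== PORT A =====
-- heapq is a library call: it is ported by its contract — heappop removes and returns the
-- smallest element (for equal Int values the result is the same value, so removing the first
-- occurrence of the minimum VALUE is exact); heappush adds the element.
def pyHeapPop (pq : List Int) : Option (Int × List Int) :=
  match PySem.List.min? pq (fun x => x) with
  | none => none                 -- heappop from an empty heap: IndexError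
  | some m => some (m, pq.erase m)

-- 'for i in range(idx, L): if dates[i] > stock: break; heapq.heappush(pq, supplies[i] * -1); idx += 1'
-- (i < L always inside the loop, so dates.getD is exact; supplies[i] out of range would be an
-- IndexError in Python — excluded by Pre_solution below)
def fillA (stock : Int) (dates supplies : List Int) (L : Nat) (pq : List Int) (idx : Nat) :
    List Int × Nat :=
  if _h : idx < L then
    if dates.getD idx 0 > stock then (pq, idx)
    else fillA stock dates supplies L (pq ++ [supplies.getD idx 0 * (-1)]) (idx + 1)
  else (pq, idx)
termination_by L - idx
decreasing_by omega

-- 'while stock < k: … stock += heapq.heappop(pq) * -1; answer += 1'; each iteration pops one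
-- element and at most L elements are ever pushed, so L+1 fuel is never exhausted before the
-- loop either returns or raises (none = IndexError, excluded by Pre_solution)
def loopA (dates supplies : List Int) (L : Nat) (k : Int) :
    Nat → Int → List Int → Nat → Int → Option Int
  | 0, _, _, _, _ => none
  | fuel + 1, stock, pq, idx, answer =>
    if stock < k then
      let r := fillA stock dates supplies L pq idx
      match pyHeapPop r.1 with
      | none => none
      | some mrest => loopA dates supplies L k fuel (stock + mrest.1 * (-1)) mrest.2 r.2 (answer + 1)
    else some answer

def solution (stock : Int) (dates : List Int) (supplies : List Int) (k : Int) : Int :=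
  (loopA dates supplies dates.length k (dates.length + 1) stock [] 0 0).getD 0

-- ===== PORT B =====
-- 'p = 0; while p < len(pool) and pool[p] >= v: p += 1; pool.insert(p, v)' — the linear scan
-- for the insertion point in the descending pool, fused with the insertion it feeds
def insDesc (pool : List Int) (v : Int) : List Int :=
  match pool with
  | [] => [v]
  | x :: t => if x ≥ v then x :: insDesc t v else v :: x :: t

-- 'while i < n and dates[i] <= stock: v = supplies[i]; …insert…; i += 1'
def fillB (stock : Int) (dates supplies : List Int) (n : Nat) (pool : List Int) (i : Nat) :
    List Int × Nat :=
  if _h : i < n then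
    if dates.getD i 0 ≤ stock then
      fillB stock dates supplies n (insDesc pool (supplies.getD i 0)) (i + 1)
    else (pool, i)
  else (pool, i)
termination_by n - i
decreasing_by omega

-- 'while stock < k: … stock += pool.pop(0); answer += 1' (pool.pop(0) on an empty pool:
-- IndexError = the none branch, excluded by Pre_solution)
def loopB (dates supplies : List Int) (n : Nat) (k : Int) :
    Nat → Int → List Int → Nat → Int → Option Int
  | 0, _, _, _, _ => none
  | fuel + 1, stock, pool, i, answer =>
    if stock < k then
      match fillB stock dates supplies n pool i with
      | (pool', i') =>
        match pool' with
        | [] => none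
        | v :: rest => loopB dates supplies n k fuel (stock + v) rest i' (answer + 1)
    else some answer

def solution_alt (stock : Int) (dates : List Int) (supplies : List Int) (k : Int) : Int :=
  (loopB dates supplies dates.length k (dates.length + 1) stock [] 0 0).getD 0

-- ===== PRECONDITION & SPEC =====
-- Pre_solution restricts to the problem's natural domain — a supply amount for every date and
-- nonnegative supply amounts — and within it states EXACTLY the feasibility condition under
-- which A's heap never underflows: whenever the stock reachable from the first p supplies is
-- still short of k, the (p+1)-th supply date must already be covered. Outside it A raises
-- IndexError, except for inputs with a negative supply amount or with fewer supplies than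
-- dates that A happens not to reach, on which A still returns (see claim.json cites).
def Pre_solution (stock : Int) (dates : List Int) (supplies : List Int) (k : Int) : Prop :=
  k ≤ stock ∨
    (dates.length ≤ supplies.length ∧
      (∀ s ∈ supplies.take dates.length, 0 ≤ s) ∧
      ∀ p ≤ dates.length, stock + (supplies.take p).sum < k →
        p < dates.length ∧ dates.getD p 0 ≤ stock + (supplies.take p).sum)

instance (stock : Int) (dates : List Int) (supplies : List Int) (k : Int) :
    Decidable (Pre_solution stock dates supplies k) := by unfold Pre_solution; infer_instance

def pvWitness_solution : Int × List Int × List Int × Int := (0, [0, 2], [3, 4], 6)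

def Spec_solution (stock : Int) (dates : List Int) (supplies : List Int) (k : Int) (out : Int) : Prop := out = solution_alt stock dates supplies k
instance (stock : Int) (dates : List Int) (supplies : List Int) (k : Int) (out : Int) : Decidable (Spec_solution stock dates supplies k out) := by unfold Spec_solution; infer_instance

-- ===== CLAIM (what is proved, stated in full; the proofs are below) =====
def Claim_equal_solution : Prop := ∀ (stock : Int) (dates : List Int) (supplies : List Int) (k : Int), Dom_solution stock dates supplies k → Pre_solution stock dates supplies k → Spec_solution stock dates supplies k (solution stock dates supplies k)

-- ===== LEMMAS AND PROOFS =====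

theorem insDesc_perm (pool : List Int) (v : Int) : (insDesc pool v).Perm (v :: pool) := by
  induction pool with
  | nil => simp [insDesc]
  | cons x t ih =>
      unfold insDesc
      by_cases h : x ≥ v
      · simp only [h, if_pos]
        exact (ih.cons x).trans (List.Perm.swap v x t)
      · simp [h]

theorem insDesc_sorted (pool : List Int) (v : Int)
    (h : pool.Pairwise (fun a b => b ≤ a)) :
    (insDesc pool v).Pairwise (fun a b => b ≤ a) := by
  induction pool with
  | nil => simp [insDesc]
  | cons x t ih =>
      rcases List.pairwise_cons.mp h with ⟨hx, ht⟩
      unfold insDesc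
      by_cases hxv : x ≥ v
      · rw [if_pos hxv]
        refine List.pairwise_cons.mpr ⟨?_, ih ht⟩
        intro b hb
        rcases List.mem_cons.mp ((insDesc_perm t v).mem_iff.mp hb) with rfl | hb
        · omega
        · exact hx b hb
      · rw [if_neg hxv]
        have hlt : x < v := lt_of_not_ge hxv
        refine List.pairwise_cons.mpr ⟨?_, h⟩
        intro b hb
        rcases List.mem_cons.mp hb with rfl | hb
        · omega
        · exact le_trans (hx b hb) (le_of_lt hlt)

theorem fill_rel (stock : Int) (dates supplies : List Int) (L : Nat)
    (i : Nat) (pool pq : List Int) (hperm : pq.Perm (pool.map (fun x => -x)))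
    (hs : pool.Pairwise (fun a b => b ≤ a)) :
    (fillA stock dates supplies L pq i).2 = (fillB stock dates supplies L pool i).2 ∧
      ((fillA stock dates supplies L pq i).1).Perm
        (((fillB stock dates supplies L pool i).1).map (fun x => -x)) ∧
      ((fillB stock dates supplies L pool i).1).Pairwise (fun a b => b ≤ a) := by
  rw [fillA, fillB]
  by_cases h1 : i < L
  · rw [dif_pos h1, dif_pos h1]
    by_cases h2 : dates.getD i 0 ≤ stock
    · rw [if_neg (not_lt.mpr h2), if_pos h2]
      apply fill_rel stock dates supplies L (i + 1)
        (insDesc pool (supplies.getD i 0)) (pq ++ [supplies.getD i 0 * (-1)])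
      · have h3 : ((insDesc pool (supplies.getD i 0)).map (fun x => -x)).Perm
            (-(supplies.getD i 0) :: pool.map (fun x => -x)) := by
          simpa using (insDesc_perm pool (supplies.getD i 0)).map (fun x => -x)
        have hsing : (pq ++ [supplies.getD i 0 * (-1)]).Perm
            (-(supplies.getD i 0) :: pq) := by
          rw [show supplies.getD i 0 * (-1) = -(supplies.getD i 0) from by ring]
          exact List.perm_append_singleton _ _
        exact ((hsing.trans (hperm.cons _)).trans h3.symm)
      · exact insDesc_sorted pool _ hs
    · rw [if_pos (lt_of_not_ge h2), if_neg h2]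
      exact ⟨rfl, hperm, hs⟩
  · rw [dif_neg h1, dif_neg h1]
    exact ⟨rfl, hperm, hs⟩
termination_by L - i
decreasing_by omega

theorem pop_rel (v : Int) (rest pq : List Int)
    (hperm : pq.Perm ((v :: rest).map (fun x => -x)))
    (hs : (v :: rest).Pairwise (fun a b => b ≤ a)) :
    pyHeapPop pq = some (-v, pq.erase (-v)) ∧ (pq.erase (-v)).Perm (rest.map (fun x => -x)) := by
  have hmem : -v ∈ pq := hperm.mem_iff.mpr (by simp)
  have hmax : ∀ b ∈ v :: rest, b ≤ v := by
    intro b hb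
    rcases List.mem_cons.mp hb with rfl | hb
    · exact le_refl _
    · exact (List.pairwise_cons.mp hs).1 b hb
  have hmin : ∀ x ∈ pq, -v ≤ x := by
    intro x hx
    obtain ⟨a, ha, rfl⟩ := List.mem_map.mp (hperm.mem_iff.mp hx)
    have := hmax a ha
    omega
  constructor
  · unfold pyHeapPop
    cases hm : PySem.List.min? pq (fun x => x) with
    | none =>
        rw [PySem.List.min?_eq_none_iff] at hm
        subst hm; simp at hmem
    | some m =>
        have h1 : m ≤ -v := PySem.List.min?_isMin hm _ hmem
        have h2 : -v ≤ m := hmin m (PySem.List.min?_mem hm)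
        rw [le_antisymm h1 h2]
  · have := hperm.erase (-v)
    simpa using this

theorem loop_rel (dates supplies : List Int) (L : Nat) (k : Int) :
    ∀ fuel stock pool pq i answer, pq.Perm (pool.map (fun x => -x)) →
      pool.Pairwise (fun a b => b ≤ a) →
      loopA dates supplies L k fuel stock pq i answer =
        loopB dates supplies L k fuel stock pool i answer := by
  intro fuel
  induction fuel with
  | zero => intro _ _ _ _ _ _ _; rfl
  | succ fuel ih =>
      intro stock pool pq i answer hperm hs
      rw [loopA, loopB]
      by_cases hk : stock < k
      · simp only [if_pos hk]
        obtain ⟨hidx, hperm', hs'⟩ := fill_rel stock dates supplies L i pool pq hperm hs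
        cases hp : (fillB stock dates supplies L pool i).1 with
        | nil =>
            rw [hp] at hperm'
            have : (fillA stock dates supplies L pq i).1 = [] := by
              simpa using hperm'.eq_nil
            simp [this, pyHeapPop, PySem.List.min?]
        | cons v rest =>
            rw [hp] at hperm' hs'
            obtain ⟨hpop, hperm''⟩ := pop_rel v rest _ hperm' hs'
            rw [hpop]
            dsimp only
            rw [hidx, show stock + -v * -1 = stock + v from by ring]
            exact ih _ rest _ _ _ hperm'' (List.pairwise_cons.mp hs').2
      · simp only [if_neg hk]

-- ===== VERDICT (by name: the statement is the Claim_ definition above) =====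
theorem solution_spec : Claim_equal_solution := by
  intro stock dates supplies k _ _
  unfold Spec_solution solution solution_alt
  rw [loop_rel dates supplies dates.length k _ stock [] [] 0 0 (by simp) (by simp)]
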